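-- pv_equiv track=rewrite | github.com/songzy12/CodeJam | kickstart/2016/Round B/D.sherlock_and_permutation_sorting.py | solve
-- ===== SOURCE A (Python) =====
-- def compute_fact(fact, n, mod):
--     for i in range(1, n + 1):
--         fact[i] = (fact[i - 1] * i) % mod
--     return fact
--
-- def compute_primitive(size, fact, primitive, mod):
--     value = fact[size]
--     for suffix_size in range(1, size):
--         value = (value - fact[size - suffix_size]
--                  * primitive[suffix_size]) % mod
--     return value
--
-- def compute_sum_f(size, fact, primitive, sum_f, mod):
--     total_f = 0
--     for suffix_size in range(1, size + 1):
--         prefix_size = size - suffix_size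
--         ways = primitive[suffix_size]
--
--         total_f = (total_f + (sum_f[prefix_size] +
--                    fact[prefix_size]) * ways) % mod
--
--     return total_f
--
-- def compute_sum_f2(size, fact, primitive, sum_f, sum_f2, mod):
--     total_f2 = 0
--     for suffix_size in range(1, size + 1):
--         prefix_size = size - suffix_size
--         ways = primitive[suffix_size]
--
--         total_f2 = (
--             total_f2
--             + (sum_f2[prefix_size] + 2 *
--                sum_f[prefix_size] + fact[prefix_size]) * ways
--         ) % mod
--
--     return total_f2
--
-- def solve(n, mod):
--     if mod == 1:
--         return 0
--
--     fact = [1] * (n + 1)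
--     primitive = [0] * (n + 1)
--     sum_f = [0] * (n + 1)
--     sum_f2 = [0] * (n + 1)
--     primitive[0] = 0
--
--     compute_fact(fact, n, mod)
--
--     for size in range(1, n + 1):
--         primitive[size] = compute_primitive(size, fact, primitive, mod)
--         sum_f[size] = compute_sum_f(size, fact, primitive, sum_f, mod)
--         sum_f2[size] = compute_sum_f2(
--             size, fact, primitive, sum_f, sum_f2, mod)
--
--     return sum_f2[n]
-- ===== SOURCE B (Python) =====
-- def solve(n, mod):
--     # Closed form: f(p) = number of prefixes {1..k} that p maps onto themselves,
--     # so sum of f^2 over all permutations is a direct double sum over the pair of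
--     # marked prefix boundaries (j <= k): j! * (k-j)! * (n-k)! ways, counted twice
--     # when j < k.  No 'primitive'/indecomposable recurrence chain is needed.
--     if mod == 1:
--         return 0
--     fact = [1] * (n + 1)
--     for i in range(1, n + 1):
--         fact[i] = fact[i - 1] * i % mod
--     total = 0
--     for k in range(1, n + 1):
--         s = fact[k]
--         for j in range(1, k):
--             s += 2 * fact[j] * fact[k - j]
--         total = (total + s * fact[n - k]) % mod
--     return total
-- ===== Notes on version B (the rewrite author's own statement) =====
-- stated objective: faster
-- what changed: B replaces A's three chained convolution recurrences over 'primitive' (indecomposable) permutation counts by the direct closed form sum over marked prefix pairs 1<=j<=k<=n of (2 - [j=k]) * j!(k-j)!(n-k)!, computed as a single double loop over one factorial table.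
-- outside the precondition, e.g. on solve(0, 0): A returns 0, B returns 0; on solve(3, 0): A raises ZeroDivisionError, B raises ZeroDivisionError; on solve(-1, 2): A raises IndexError, B returns 0
import Mathlib
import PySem

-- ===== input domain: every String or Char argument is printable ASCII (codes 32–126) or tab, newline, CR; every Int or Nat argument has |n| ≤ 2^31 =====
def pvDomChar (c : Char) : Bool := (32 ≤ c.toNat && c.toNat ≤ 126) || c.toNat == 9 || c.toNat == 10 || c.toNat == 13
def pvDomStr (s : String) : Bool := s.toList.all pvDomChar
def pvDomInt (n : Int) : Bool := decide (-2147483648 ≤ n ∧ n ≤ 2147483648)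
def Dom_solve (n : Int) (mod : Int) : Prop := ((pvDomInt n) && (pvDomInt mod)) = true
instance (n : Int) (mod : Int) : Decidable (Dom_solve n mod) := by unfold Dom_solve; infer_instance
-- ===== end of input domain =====

-- B replaces A's chain of 'primitive permutation' convolution recurrences by the direct
-- closed-form pair-counting double sum  sum_{j<=k} j!(k-j)!(n-k)!  (objective: faster, constant factor).


-- ===== PORT A =====
def computeFact (fact : List Int) (n m : Int) : List Int :=
  (PySem.List.pyRange 1 (n+1) 1).foldl
    (fun f i => PySem.List.pySetD f i (PySem.Int.mod (PySem.List.pyGetD f (i-1) 0 * i) m)) fact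

def computePrimitive (size : Int) (fact primitive : List Int) (m : Int) : Int :=
  (PySem.List.pyRange 1 size 1).foldl
    (fun value t => PySem.Int.mod (value - PySem.List.pyGetD fact (size - t) 0 * PySem.List.pyGetD primitive t 0) m)
    (PySem.List.pyGetD fact size 0)

def computeSumF (size : Int) (fact primitive sum_f : List Int) (m : Int) : Int :=
  (PySem.List.pyRange 1 (size+1) 1).foldl
    (fun total t => PySem.Int.mod (total + (PySem.List.pyGetD sum_f (size - t) 0 + PySem.List.pyGetD fact (size - t) 0) * PySem.List.pyGetD primitive t 0) m)
    0

def computeSumF2 (size : Int) (fact primitive sum_f sum_f2 : List Int) (m : Int) : Int :=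
  (PySem.List.pyRange 1 (size+1) 1).foldl
    (fun total t => PySem.Int.mod (total + (PySem.List.pyGetD sum_f2 (size - t) 0 + 2 * PySem.List.pyGetD sum_f (size - t) 0 + PySem.List.pyGetD fact (size - t) 0) * PySem.List.pyGetD primitive t 0) m)
    0

-- the body of A's main for-loop (sets primitive[size], sum_f[size], sum_f2[size])
def loopA (fact : List Int) (m : Int) (st : List Int × List Int × List Int) (size : Int) :
    List Int × List Int × List Int :=
  let primitive := PySem.List.pySetD st.1 size (computePrimitive size fact st.1 m)
  let sum_f := PySem.List.pySetD st.2.1 size (computeSumF size fact primitive st.2.1 m)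
  let sum_f2 := PySem.List.pySetD st.2.2 size (computeSumF2 size fact primitive sum_f st.2.2 m)
  (primitive, sum_f, sum_f2)

def solve (n : Int) (mod : Int) : Int :=
  if mod = 1 then 0
  else
    let fact := List.replicate (n+1).toNat 1
    let primitive := List.replicate (n+1).toNat 0
    let sum_f := List.replicate (n+1).toNat 0
    let sum_f2 := List.replicate (n+1).toNat 0
    let primitive := PySem.List.pySetD primitive 0 0
    let fact := computeFact fact n mod
    let st := (PySem.List.pyRange 1 (n+1) 1).foldl (loopA fact mod) (primitive, sum_f, sum_f2)
    PySem.List.pyGetD st.2.2 n 0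

-- ===== PORT B =====
-- the body of B's outer for-loop: adds the k-th closed-form term to the running total
def loopB (fact : List Int) (n m : Int) (total : Int) (k : Int) : Int :=
  let s := (PySem.List.pyRange 1 k 1).foldl
    (fun s j => s + 2 * PySem.List.pyGetD fact j 0 * PySem.List.pyGetD fact (k - j) 0)
    (PySem.List.pyGetD fact k 0)
  PySem.Int.mod (total + s * PySem.List.pyGetD fact (n - k) 0) m

def solve_alt (n : Int) (mod : Int) : Int :=
  if mod = 1 then 0
  else
  let fact := (PySem.List.pyRange 1 (n+1) 1).foldl
    (fun f i => PySem.List.pySetD f i (PySem.Int.mod (PySem.List.pyGetD f (i-1) 0 * i) mod))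
    (List.replicate (n+1).toNat 1)
  (PySem.List.pyRange 1 (n+1) 1).foldl (loopB fact n mod) 0

-- ===== PRECONDITION & SPEC =====
-- Pre_ excludes mod = 0 (A raises ZeroDivisionError whenever the loops run; only the degenerate
-- n = 0 ever returns there) and n < 0 with mod ≠ 1 (A raises IndexError on sum_f2[n]).
def Pre_solve (n : Int) (mod : Int) : Prop := mod ≠ 0 ∧ (0 ≤ n ∨ mod = 1)
instance (n : Int) (mod : Int) : Decidable (Pre_solve n mod) := by unfold Pre_solve; infer_instance

def pvWitness_solve : Int × Int := (4, 7)

def Spec_solve (n : Int) (mod : Int) (out : Int) : Prop := out = solve_alt n mod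
instance (n : Int) (mod : Int) (out : Int) : Decidable (Spec_solve n mod out) := by unfold Spec_solve; infer_instance

-- ===== CLAIM (what is proved, stated in full; the proofs are below) =====
def Claim_equal_solve : Prop := ∀ (n : Int) (mod : Int), Dom_solve n mod → Pre_solve n mod → Spec_solve n mod (solve n mod)

-- ===== LEMMAS AND PROOFS =====

def F : ℕ → ℤ
  | 0 => 1
  | (i+1) => F i * ((i : ℤ) + 1)

def P : ℕ → ℤ
  | 0 => 0
  | (s+1) => F (s+1) - ∑ t ∈ (Finset.range s).attach, F (s - t.1) * P (t.1 + 1)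
  decreasing_by exact Nat.succ_lt_succ (Finset.mem_range.mp t.2)

def SF : ℕ → ℤ
  | 0 => 0
  | (s+1) => ∑ t ∈ (Finset.range (s+1)).attach, (SF (s - t.1) + F (s - t.1)) * P (t.1 + 1)
  decreasing_by exact Nat.lt_succ_of_le (Nat.sub_le s t.1)

def SF2 : ℕ → ℤ
  | 0 => 0
  | (s+1) => ∑ t ∈ (Finset.range (s+1)).attach,
      (SF2 (s - t.1) + 2 * SF (s - t.1) + F (s - t.1)) * P (t.1 + 1)
  decreasing_by all_goals exact Nat.lt_succ_of_le (Nat.sub_le s t.1)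

lemma P_succ (s : ℕ) : P (s+1) = F (s+1) - ∑ t ∈ Finset.range s, F (s - t) * P (t + 1) := by
  rw [P, Finset.sum_attach (Finset.range s) (fun t => F (s - t) * P (t + 1))]

lemma SF_succ (s : ℕ) :
    SF (s+1) = ∑ t ∈ Finset.range (s+1), (SF (s - t) + F (s - t)) * P (t + 1) := by
  rw [SF, Finset.sum_attach (Finset.range (s+1)) (fun t => (SF (s - t) + F (s - t)) * P (t + 1))]

lemma SF2_succ (s : ℕ) :
    SF2 (s+1) = ∑ t ∈ Finset.range (s+1),
      (SF2 (s - t) + 2 * SF (s - t) + F (s - t)) * P (t + 1) := by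
  rw [SF2, Finset.sum_attach (Finset.range (s+1)) (fun t => (SF2 (s - t) + 2 * SF (s - t) + F (s - t)) * P (t + 1))]

-- L1
lemma L1 (s : ℕ) : F (s+1) = ∑ t ∈ Finset.range (s+1), P (t+1) * F (s - t) := by
  rw [Finset.sum_range_succ]
  have h : ∀ t ∈ Finset.range s, P (t+1) * F (s - t) = F (s - t) * P (t+1) :=
    fun t _ => mul_comm _ _
  rw [Finset.sum_congr rfl h, Nat.sub_self]
  show F (s+1) = _ + P (s+1) * F 0
  rw [P_succ]
  show F (s+1) = _ + (F (s+1) - _) * (1 : ℤ)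
  ring

-- triangle swap
lemma tri (N : ℕ) (f : ℕ → ℕ → ℤ) :
    ∑ t ∈ Finset.range N, ∑ k ∈ Finset.range (N - t), f t k
      = ∑ k ∈ Finset.range N, ∑ t ∈ Finset.range (N - k), f t k := by
  have h1 : ∀ t, Finset.range (N - t) = (Finset.range N).filter (fun k => t + k < N) := by
    intro t; ext k; simp [Finset.mem_filter]; omega
  calc ∑ t ∈ Finset.range N, ∑ k ∈ Finset.range (N - t), f t k
      = ∑ t ∈ Finset.range N, ∑ k ∈ Finset.range N, if t + k < N then f t k else 0 := by
        refine Finset.sum_congr rfl fun t _ => ?_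
        rw [h1 t, Finset.sum_filter]
    _ = ∑ k ∈ Finset.range N, ∑ t ∈ Finset.range N, if t + k < N then f t k else 0 :=
        Finset.sum_comm
    _ = ∑ k ∈ Finset.range N, ∑ t ∈ Finset.range (N - k), f t k := by
        refine Finset.sum_congr rfl fun k _ => ?_
        have h2 : Finset.range (N - k) = (Finset.range N).filter (fun t => t + k < N) := by
          ext t; simp [Finset.mem_filter]; omega
        rw [h2, Finset.sum_filter]

-- pulled-out convolution form of a processed prefix value
lemma conv_form (ih : ∀ m, m < s + 1 → SF m = ∑ k ∈ Finset.range m, F (k+1) * F (m - (k+1)))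
    (t : ℕ) (ht : t ≤ s) :
    SF (s - t) + F (s - t) = ∑ k ∈ Finset.range ((s+1) - t), F k * F (s - t - k) := by
  have hr : (s+1) - t = (s - t) + 1 := by omega
  rw [hr, Finset.sum_range_succ', ih (s - t) (by omega)]
  simp [F]

-- L2
lemma L2 : ∀ n, SF n = ∑ k ∈ Finset.range n, F (k+1) * F (n - (k+1)) := by
  intro n
  induction n using Nat.strong_induction_on with
  | _ n ih =>
    match n with
    | 0 => simp [SF]
    | (s+1) =>
      rw [SF_succ]
      have step1 : ∑ t ∈ Finset.range (s+1), (SF (s - t) + F (s - t)) * P (t + 1)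
          = ∑ t ∈ Finset.range (s+1), ∑ k ∈ Finset.range ((s+1) - t),
              (F k * F (s - t - k)) * P (t+1) := by
        refine Finset.sum_congr rfl fun t htm => ?_
        rw [conv_form ih t (by simpa using Nat.lt_succ_iff.mp (Finset.mem_range.mp htm)),
          Finset.sum_mul]
      rw [step1, tri (s+1) (fun t k => (F k * F (s - t - k)) * P (t+1))]
      have step2 : ∀ k ∈ Finset.range (s+1),
          ∑ t ∈ Finset.range ((s+1) - k), (F k * F (s - t - k)) * P (t+1)
            = F k * F ((s+1) - k) := by
        intro k hk
        have hk' : k ≤ s := Nat.lt_succ_iff.mp (Finset.mem_range.mp hk)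
        have hr : (s+1) - k = (s - k) + 1 := by omega
        have hL1 := L1 (s - k)
        calc ∑ t ∈ Finset.range ((s+1) - k), (F k * F (s - t - k)) * P (t+1)
            = F k * ∑ t ∈ Finset.range ((s - k) + 1), P (t+1) * F ((s - k) - t) := by
              rw [Finset.mul_sum, hr]
              refine Finset.sum_congr rfl fun t _ => ?_
              have : s - t - k = (s - k) - t := by omega
              rw [this]; ring
          _ = F k * F ((s - k) + 1) := by rw [← hL1]
          _ = F k * F ((s+1) - k) := by rw [← hr]
      rw [Finset.sum_congr rfl step2]
      rw [← Finset.sum_range_reflect (fun k => F k * F ((s+1) - k)) (s+1)]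
      refine Finset.sum_congr rfl fun j hj => ?_
      have hj' : j ≤ s := Nat.lt_succ_iff.mp (Finset.mem_range.mp hj)
      have h1 : s + 1 - 1 - j = s - j := by omega
      have h2 : (s+1) - (s - j) = j + 1 := by omega
      have h3 : (s+1) - (j+1) = s - j := by omega
      rw [h1, h2, h3, mul_comm]

def Hw : ℕ → ℤ
  | 0 => 1
  | (k+1) => 2 * SF (k+1) + F (k+1)

lemma SF_split (p : ℕ) :
    SF (p+1) = (∑ k ∈ Finset.range p, F (k+1) * F (p - k)) + F (p+1) := by
  rw [L2 (p+1), Finset.sum_range_succ]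
  simp [F]

lemma conv2_form {s : ℕ}
    (ih : ∀ m, m < s + 1 → SF2 m = ∑ k ∈ Finset.range m, (2 * SF (k+1) - F (k+1)) * F (m - (k+1)))
    (t : ℕ) (ht : t ≤ s) :
    SF2 (s - t) + 2 * SF (s - t) + F (s - t)
      = ∑ k ∈ Finset.range ((s+1) - t), Hw k * F (s - t - k) := by
  have hr : (s+1) - t = (s - t) + 1 := by omega
  rw [hr, Finset.sum_range_succ', ih (s - t) (by omega), L2 (s - t)]
  have expand : ∀ k ∈ Finset.range (s - t), Hw (k+1) * F (s - t - (k+1))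
      = (2 * SF (k+1) - F (k+1)) * F (s - t - (k+1)) + 2 * (F (k+1) * F (s - t - (k+1))) := by
    intro k _
    show (2 * SF (k+1) + F (k+1)) * F (s - t - (k+1)) = _
    ring
  rw [Finset.sum_congr rfl expand, Finset.sum_add_distrib, ← Finset.mul_sum]
  show _ = _ + Hw 0 * F (s - t - 0)
  simp [Hw]

-- L3
lemma L3 : ∀ n, SF2 n = ∑ k ∈ Finset.range n, (2 * SF (k+1) - F (k+1)) * F (n - (k+1)) := by
  intro n
  induction n using Nat.strong_induction_on with
  | _ n ih =>
    match n with
    | 0 => simp [SF2]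
    | (s+1) =>
      rw [SF2_succ]
      have step1 : ∑ t ∈ Finset.range (s+1), (SF2 (s - t) + 2 * SF (s - t) + F (s - t)) * P (t + 1)
          = ∑ t ∈ Finset.range (s+1), ∑ k ∈ Finset.range ((s+1) - t),
              (Hw k * F (s - t - k)) * P (t+1) := by
        refine Finset.sum_congr rfl fun t htm => ?_
        rw [conv2_form ih t (Nat.lt_succ_iff.mp (Finset.mem_range.mp htm)), Finset.sum_mul]
      rw [step1, tri (s+1) (fun t k => (Hw k * F (s - t - k)) * P (t+1))]
      have step2 : ∀ k ∈ Finset.range (s+1),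
          ∑ t ∈ Finset.range ((s+1) - k), (Hw k * F (s - t - k)) * P (t+1)
            = Hw k * F ((s+1) - k) := by
        intro k hk
        have hk' : k ≤ s := Nat.lt_succ_iff.mp (Finset.mem_range.mp hk)
        have hr : (s+1) - k = (s - k) + 1 := by omega
        calc ∑ t ∈ Finset.range ((s+1) - k), (Hw k * F (s - t - k)) * P (t+1)
            = Hw k * ∑ t ∈ Finset.range ((s - k) + 1), P (t+1) * F ((s - k) - t) := by
              rw [Finset.mul_sum, hr]
              refine Finset.sum_congr rfl fun t _ => ?_
              have : s - t - k = (s - k) - t := by omega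
              rw [this]; ring
          _ = Hw k * F ((s - k) + 1) := by rw [← L1 (s - k)]
          _ = Hw k * F ((s+1) - k) := by rw [← hr]
      rw [Finset.sum_congr rfl step2,
        Finset.sum_range_succ' (fun k => Hw k * F ((s+1) - k)) s,
        Finset.sum_range_succ]
      have expand : ∀ k ∈ Finset.range s, Hw (k+1) * F ((s+1) - (k+1))
          = (2 * SF (k+1) - F (k+1)) * F ((s+1) - (k+1)) + 2 * (F (k+1) * F (s - k)) := by
        intro k hk
        have : (s+1) - (k+1) = s - k := by omega
        rw [this]
        show (2 * SF (k+1) + F (k+1)) * F (s - k) = _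
        ring
      rw [Finset.sum_congr rfl expand, Finset.sum_add_distrib, ← Finset.mul_sum, SF_split s]
      have e1 : ∀ k ∈ Finset.range s, (2 * SF (k+1) - F (k+1)) * F ((s+1) - (k+1))
          = (2 * SF (k+1) - F (k+1)) * F (s - k) := by
        intro k hk
        have : (s+1) - (k+1) = s - k := by omega
        rw [this]
      rw [Finset.sum_congr rfl e1]
      simp [Hw, F]
      ring

-- pm lemmas
lemma pm_modeq (a m : Int) : Int.ModEq m (PySem.Int.mod a m) a := by
  have h := PySem.Int.floordiv_mul_add_mod a m
  have h2 : PySem.Int.mod a m = a - PySem.Int.floordiv a m * m := by linarith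
  rw [h2]
  exact Int.modEq_iff_dvd.mpr ⟨PySem.Int.floordiv a m, by ring⟩

lemma pm_congr {m a b : Int} (hm : m ≠ 0) (h : Int.ModEq m a b) :
    PySem.Int.mod a m = PySem.Int.mod b m := by
  rcases lt_or_gt_of_ne hm with hneg | hpos
  · have ba := PySem.Int.mod_neg_bounds a hneg
    have bb := PySem.Int.mod_neg_bounds b hneg
    have hmod : Int.ModEq m (PySem.Int.mod a m) (PySem.Int.mod b m) :=
      ((pm_modeq a m).trans h).trans (pm_modeq b m).symm
    have hdvd : m ∣ PySem.Int.mod b m - PySem.Int.mod a m := Int.ModEq.dvd hmod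
    obtain ⟨c, hc⟩ := hdvd
    rcases lt_trichotomy c 0 with h1 | h1 | h1
    · nlinarith [ba.1, ba.2, bb.1, bb.2]
    · rw [h1, mul_zero] at hc; omega
    · nlinarith [ba.1, ba.2, bb.1, bb.2]
  · rw [PySem.Int.mod_eq_emod_of_pos hpos, PySem.Int.mod_eq_emod_of_pos hpos]
    exact h

lemma pm_idem {m : Int} (hm : m ≠ 0) (a : Int) :
    PySem.Int.mod (PySem.Int.mod a m) m = PySem.Int.mod a m :=
  pm_congr hm (pm_modeq a m)

-- generic fold lemmas
lemma foldl_pm_modeq (m : Int) (g G : Int → Int → Int) :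
    ∀ (L : List Int) (init I0 : Int),
      (∀ t ∈ L, ∀ a b : Int, Int.ModEq m a b → Int.ModEq m (g a t) (G b t)) →
      Int.ModEq m init I0 →
      Int.ModEq m (L.foldl (fun a t => PySem.Int.mod (g a t) m) init) (L.foldl G I0) := by
  intro L
  induction L with
  | nil => intro init I0 _ h; exact h
  | cons x L ih =>
    intro init I0 hg h
    simp only [List.foldl_cons]
    exact ih _ _ (fun t ht a b hab => hg t (List.mem_cons_of_mem x ht) a b hab)
      ((pm_modeq _ m).trans (hg x (List.mem_cons_self) init I0 h))

lemma foldl_modeq_plain (m : Int) (g G : Int → Int → Int) :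
    ∀ (L : List Int) (init I0 : Int),
      (∀ t ∈ L, ∀ a b : Int, Int.ModEq m a b → Int.ModEq m (g a t) (G b t)) →
      Int.ModEq m init I0 →
      Int.ModEq m (L.foldl g init) (L.foldl G I0) := by
  intro L
  induction L with
  | nil => intro init I0 _ h; exact h
  | cons x L ih =>
    intro init I0 hg h
    simp only [List.foldl_cons]
    exact ih _ _ (fun t ht a b hab => hg t (List.mem_cons_of_mem x ht) a b hab)
      (hg x (List.mem_cons_self) init I0 h)

lemma foldl_pm_red (m : Int) (hm : m ≠ 0) (g : Int → Int → Int) :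
    ∀ (L : List Int) (init : Int),
      (L ≠ [] ∨ PySem.Int.mod init m = init) →
      PySem.Int.mod (L.foldl (fun a t => PySem.Int.mod (g a t) m) init) m
        = L.foldl (fun a t => PySem.Int.mod (g a t) m) init := by
  intro L
  induction L with
  | nil =>
    intro init h
    simp only [List.foldl_nil]
    rcases h with h | h
    · exact absurd rfl h
    · exact h
  | cons x L ih =>
    intro init _
    simp only [List.foldl_cons]
    exact ih _ (Or.inr (pm_idem hm _))

lemma foldl_sub_eq (E : Int → Int) :
    ∀ (L : List Int) (I0 : Int), L.foldl (fun a t => a - E t) I0 = I0 - (L.map E).sum := by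
  intro L
  induction L with
  | nil => intro I0; simp
  | cons x L ih => intro I0; simp only [List.foldl_cons, List.map_cons, List.sum_cons, ih]; ring

lemma sum_map_pyRange (K : ℕ) (E : Int → Int) :
    ((PySem.List.pyRange 1 ((K : Int) + 1) 1).map E).sum = ∑ t ∈ Finset.range K, E ((t : Int) + 1) := by
  rw [PySem.List.pyRange_one]
  have : ((K : Int) + 1 - 1).toNat = K := by omega
  rw [this, List.map_map]
  have : ∀ x ∈ List.range K, (E ∘ fun k : ℕ => (1 : Int) + ↑k) x = (fun t : ℕ => E ((t : Int) + 1)) x := by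
    intro x _; simp [add_comm]
  rw [List.map_congr_left this]
  rfl

lemma nonempty_pyRange (K : ℕ) (hK : 1 ≤ K) : PySem.List.pyRange 1 ((K : Int) + 1) 1 ≠ [] := by
  rw [PySem.List.pyRange_one_cons (by exact_mod_cast by omega : (1:Int) < (K : Int) + 1)]
  simp

def Fm (m : Int) : ℕ → Int
  | 0 => 1
  | (i+1) => PySem.Int.mod (Fm m i * ((i : Int) + 1)) m

lemma fact_char_aux (m : Int) (N : ℕ) :
    ∀ k, k ≤ N →
      (PySem.List.pyRange 1 ((k : Int) + 1) 1).foldl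
          (fun f i => PySem.List.pySetD f i (PySem.Int.mod (PySem.List.pyGetD f (i-1) 0 * i) m))
          (List.replicate (N+1) 1)
        = (List.range (k+1)).map (Fm m) ++ List.replicate (N - k) 1 := by
  intro k
  induction k with
  | zero =>
    intro _
    rw [PySem.List.pyRange_one_eq_nil (by norm_num)]
    simp [List.replicate_succ, Fm]
  | succ k ih =>
    intro hk
    have hc : ((k+1 : ℕ) : Int) + 1 = ((k : Int) + 1) + 1 := by push_cast; ring
    rw [hc, PySem.List.pyRange_one_succ_right (by omega : (1:Int) ≤ (k : Int) + 1),
      List.foldl_append, ih (by omega)]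
    simp only [List.foldl_cons, List.foldl_nil]
    have hidx : ((k : Int) + 1) - 1 = ((k : ℕ) : Int) := by ring
    rw [hidx, PySem.List.pyGetD_natCast]
    have hget : (((List.range (k+1)).map (Fm m)) ++ List.replicate (N - k) 1).getD k 0 = Fm m k := by
      rw [List.getD_append _ _ 0 k (by simp), PySem.List.getD_map_range _ _ _ _ (by omega)]
    rw [hget]
    have hcast : ((k : Int) + 1) = (((k+1 : ℕ)) : Int) := by push_cast; ring
    rw [hcast, PySem.List.pySetD_natCast,
      List.set_append_right (k+1) _ (by simp),
      show N - k = (N - (k+1)) + 1 from by omega, List.replicate_succ]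
    simp only [List.length_map, List.length_range, Nat.sub_self, List.set_cons_zero]
    rw [List.append_cons]
    congr 1
    · conv_rhs => rw [List.range_succ]
      rw [List.map_append]
      congr 1


lemma pm_zero {m : Int} (hm : m ≠ 0) : PySem.Int.mod 0 m = 0 := by
  rcases lt_or_gt_of_ne hm with hneg | hpos
  · have b := PySem.Int.mod_neg_bounds 0 hneg
    have h := pm_modeq 0 m
    obtain ⟨c, hc⟩ := h.dvd
    rcases lt_trichotomy c 0 with h1 | h1 | h1
    · nlinarith [b.1, b.2]
    · rw [h1, mul_zero] at hc; omega
    · nlinarith [b.1, b.2]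
  · rw [PySem.Int.mod_eq_emod_of_pos hpos]; simp

lemma Fm_modeq (m : Int) : ∀ i, Int.ModEq m (Fm m i) (F i)
  | 0 => Int.ModEq.refl 1
  | (i+1) => (pm_modeq _ m).trans ((Fm_modeq m i).mul_right _)

lemma Fm_red {m : Int} (hm : m ≠ 0) (i : ℕ) (hi : 1 ≤ i) :
    PySem.Int.mod (Fm m i) m = Fm m i := by
  cases i with
  | zero => omega
  | succ j => exact pm_idem hm _

def factL (m : Int) (N : ℕ) : List Int := (List.range (N+1)).map (Fm m)

lemma getF (m : Int) (N i : ℕ) (h : i ≤ N) :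
    PySem.List.pyGetD (factL m N) ((i : ℕ) : Int) 0 = Fm m i := by
  rw [PySem.List.pyGetD_natCast, factL, PySem.List.getD_map_range _ _ _ _ (by omega)]

lemma getD_set_self (l : List Int) (j : ℕ) (v : Int) (h : j < l.length) :
    (l.set j v).getD j 0 = v := by
  simp [List.getD_eq_getElem?_getD, h]

lemma getD_set_ne (l : List Int) (i j : ℕ) (v : Int) (h : i ≠ j) :
    (l.set j v).getD i 0 = l.getD i 0 := by
  simp [List.getD_eq_getElem?_getD, Ne.symm h]

lemma getD_repl (n i : ℕ) : (List.replicate n (0:Int)).getD i 0 = 0 := by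
  rcases Nat.lt_or_ge i n with h | h
  · simp [List.getD_eq_getElem?_getD, h]
  · rw [List.getD_eq_getElem?_getD, List.getElem?_eq_none (by simpa using h)]
    rfl

lemma prim_step {m : Int} (hm : m ≠ 0) (N σ : ℕ) (hσ : σ + 1 ≤ N) (p : List Int)
    (hp : ∀ τ : ℕ, τ ≤ σ → Int.ModEq m (p.getD τ 0) (P τ)) :
    computePrimitive ((σ : Int) + 1) (factL m N) p m = PySem.Int.mod (P (σ+1)) m := by
  unfold computePrimitive
  have hinit : PySem.List.pyGetD (factL m N) ((σ:Int)+1) 0 = Fm m (σ+1) := by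
    rw [show ((σ:Int)+1) = (((σ+1:ℕ)):Int) from by push_cast; ring]
    exact getF m N (σ+1) (by omega)
  rw [hinit]
  have hcong := foldl_pm_modeq m
    (fun value t => value - PySem.List.pyGetD (factL m N) (((σ:Int)+1) - t) 0 * PySem.List.pyGetD p t 0)
    (fun b t => b - F (σ + 1 - t.toNat) * P t.toNat)
    (PySem.List.pyRange 1 ((σ:Int)+1) 1) (Fm m (σ+1)) (F (σ+1))
    (by
      intro t ht a b hab
      rw [PySem.List.mem_pyRange_one] at ht
      dsimp only
      obtain ⟨τ, rfl⟩ : ∃ τ : ℕ, t = (τ : Int) := ⟨t.toNat, by omega⟩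
      simp only [Int.toNat_natCast]
      have hτ1 : 1 ≤ τ := by omega
      have hτσ : τ ≤ σ := by omega
      have hidx : ((σ:Int)+1) - (τ:Int) = (((σ+1-τ : ℕ)) : Int) := by push_cast; omega
      rw [hidx, getF m N (σ+1-τ) (by omega), PySem.List.pyGetD_natCast]
      exact hab.sub ((Fm_modeq m _).mul (hp τ hτσ)))
    (Fm_modeq m (σ+1))
  have hpure : (PySem.List.pyRange 1 ((σ:Int)+1) 1).foldl
      (fun b t => b - F (σ + 1 - t.toNat) * P t.toNat) (F (σ+1)) = P (σ+1) := by
    rw [foldl_sub_eq (fun t => F (σ + 1 - t.toNat) * P t.toNat), sum_map_pyRange σ, P_succ]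
    congr 1
    refine Finset.sum_congr rfl fun t ht => ?_
    have h1 : ((t:Int)+1).toNat = t+1 := by omega
    rw [h1]
    congr 2
    omega
  have hred := foldl_pm_red m hm
    (fun value t => value - PySem.List.pyGetD (factL m N) (((σ:Int)+1) - t) 0 * PySem.List.pyGetD p t 0)
    (PySem.List.pyRange 1 ((σ:Int)+1) 1) (Fm m (σ+1))
    (Or.inr (Fm_red hm (σ+1) (by omega)))
  rw [hpure] at hcong
  rw [← hred]
  exact pm_congr hm hcong

lemma sumF_step {m : Int} (hm : m ≠ 0) (N σ : ℕ) (hσ : σ + 1 ≤ N) (p f : List Int)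
    (hp : ∀ τ : ℕ, τ ≤ σ + 1 → Int.ModEq m (p.getD τ 0) (P τ))
    (hf : ∀ τ : ℕ, τ ≤ σ → Int.ModEq m (f.getD τ 0) (SF τ)) :
    computeSumF ((σ : Int) + 1) (factL m N) p f m = PySem.Int.mod (SF (σ+1)) m := by
  unfold computeSumF
  rw [show ((σ:Int)+1)+1 = (((σ+1:ℕ)):Int)+1 from by push_cast; ring]
  have hcong := foldl_pm_modeq m
    (fun total t => total + (PySem.List.pyGetD f (((σ:Int)+1) - t) 0 + PySem.List.pyGetD (factL m N) (((σ:Int)+1) - t) 0) * PySem.List.pyGetD p t 0)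
    (fun b t => b + (SF (σ + 1 - t.toNat) + F (σ + 1 - t.toNat)) * P t.toNat)
    (PySem.List.pyRange 1 (((σ+1:ℕ):Int)+1) 1) 0 0
    (by
      intro t ht a b hab
      rw [PySem.List.mem_pyRange_one] at ht
      dsimp only
      obtain ⟨τ, rfl⟩ : ∃ τ : ℕ, t = (τ : Int) := ⟨t.toNat, by omega⟩
      simp only [Int.toNat_natCast]
      have hτ1 : 1 ≤ τ := by omega
      have hτσ : τ ≤ σ + 1 := by omega
      have hidx : ((σ:Int)+1) - (τ:Int) = (((σ+1-τ : ℕ)) : Int) := by push_cast; omega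
      rw [hidx, getF m N (σ+1-τ) (by omega), PySem.List.pyGetD_natCast, PySem.List.pyGetD_natCast]
      exact hab.add (((hf (σ+1-τ) (by omega)).add (Fm_modeq m (σ+1-τ))).mul (hp τ hτσ)))
    (Int.ModEq.refl 0)
  have hpure : (PySem.List.pyRange 1 (((σ+1:ℕ):Int)+1) 1).foldl
      (fun b t => b + (SF (σ + 1 - t.toNat) + F (σ + 1 - t.toNat)) * P t.toNat) 0 = SF (σ+1) := by
    rw [PySem.List.foldl_add, sum_map_pyRange (σ+1), SF_succ, zero_add]
    refine Finset.sum_congr rfl fun t ht => ?_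
    have h1 : ((t:Int)+1).toNat = t+1 := by omega
    rw [h1]
    have h2 : σ + 1 - (t+1) = σ - t := by omega
    rw [h2]
  have hred := foldl_pm_red m hm
    (fun total t => total + (PySem.List.pyGetD f (((σ:Int)+1) - t) 0 + PySem.List.pyGetD (factL m N) (((σ:Int)+1) - t) 0) * PySem.List.pyGetD p t 0)
    (PySem.List.pyRange 1 (((σ+1:ℕ):Int)+1) 1) 0
    (Or.inl (nonempty_pyRange (σ+1) (by omega)))
  rw [hpure] at hcong
  rw [← hred]
  exact pm_congr hm hcong

lemma sumF2_step {m : Int} (hm : m ≠ 0) (N σ : ℕ) (hσ : σ + 1 ≤ N) (p f f2 : List Int)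
    (hp : ∀ τ : ℕ, τ ≤ σ + 1 → Int.ModEq m (p.getD τ 0) (P τ))
    (hf : ∀ τ : ℕ, τ ≤ σ → Int.ModEq m (f.getD τ 0) (SF τ))
    (hf2 : ∀ τ : ℕ, τ ≤ σ → Int.ModEq m (f2.getD τ 0) (SF2 τ)) :
    computeSumF2 ((σ : Int) + 1) (factL m N) p f f2 m = PySem.Int.mod (SF2 (σ+1)) m := by
  unfold computeSumF2
  rw [show ((σ:Int)+1)+1 = (((σ+1:ℕ)):Int)+1 from by push_cast; ring]
  have hcong := foldl_pm_modeq m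
    (fun total t => total + (PySem.List.pyGetD f2 (((σ:Int)+1) - t) 0 + 2 * PySem.List.pyGetD f (((σ:Int)+1) - t) 0 + PySem.List.pyGetD (factL m N) (((σ:Int)+1) - t) 0) * PySem.List.pyGetD p t 0)
    (fun b t => b + (SF2 (σ + 1 - t.toNat) + 2 * SF (σ + 1 - t.toNat) + F (σ + 1 - t.toNat)) * P t.toNat)
    (PySem.List.pyRange 1 (((σ+1:ℕ):Int)+1) 1) 0 0
    (by
      intro t ht a b hab
      rw [PySem.List.mem_pyRange_one] at ht
      dsimp only
      obtain ⟨τ, rfl⟩ : ∃ τ : ℕ, t = (τ : Int) := ⟨t.toNat, by omega⟩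
      simp only [Int.toNat_natCast]
      have hτ1 : 1 ≤ τ := by omega
      have hτσ : τ ≤ σ + 1 := by omega
      have hidx : ((σ:Int)+1) - (τ:Int) = (((σ+1-τ : ℕ)) : Int) := by push_cast; omega
      rw [hidx, getF m N (σ+1-τ) (by omega), PySem.List.pyGetD_natCast, PySem.List.pyGetD_natCast, PySem.List.pyGetD_natCast]
      exact hab.add ((((hf2 (σ+1-τ) (by omega)).add (((hf (σ+1-τ) (by omega)).mul_left 2))).add (Fm_modeq m (σ+1-τ))).mul (hp τ hτσ)))
    (Int.ModEq.refl 0)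
  have hpure : (PySem.List.pyRange 1 (((σ+1:ℕ):Int)+1) 1).foldl
      (fun b t => b + (SF2 (σ + 1 - t.toNat) + 2 * SF (σ + 1 - t.toNat) + F (σ + 1 - t.toNat)) * P t.toNat) 0 = SF2 (σ+1) := by
    rw [PySem.List.foldl_add, sum_map_pyRange (σ+1), SF2_succ, zero_add]
    refine Finset.sum_congr rfl fun t ht => ?_
    have h1 : ((t:Int)+1).toNat = t+1 := by omega
    rw [h1]
    have h2 : σ + 1 - (t+1) = σ - t := by omega
    rw [h2]
  have hred := foldl_pm_red m hm
    (fun total t => total + (PySem.List.pyGetD f2 (((σ:Int)+1) - t) 0 + 2 * PySem.List.pyGetD f (((σ:Int)+1) - t) 0 + PySem.List.pyGetD (factL m N) (((σ:Int)+1) - t) 0) * PySem.List.pyGetD p t 0)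
    (PySem.List.pyRange 1 (((σ+1:ℕ):Int)+1) 1) 0
    (Or.inl (nonempty_pyRange (σ+1) (by omega)))
  rw [hpure] at hcong
  rw [← hred]
  exact pm_congr hm hcong

def stN (m : Int) (N σ : ℕ) : List Int × List Int × List Int :=
  (PySem.List.pyRange 1 ((σ:Int)+1) 1).foldl (loopA (factL m N) m)
    (List.replicate (N+1) 0, List.replicate (N+1) 0, List.replicate (N+1) 0)

lemma stN_succ (m : Int) (N σ : ℕ) :
    stN m N (σ+1) = loopA (factL m N) m (stN m N σ) ((σ:Int)+1) := by
  unfold stN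
  rw [show (((σ+1:ℕ)):Int)+1 = (((σ:Int))+1)+1 from by push_cast; ring,
    PySem.List.pyRange_one_succ_right (by omega : (1:Int) ≤ (σ:Int)+1), List.foldl_append]
  simp

lemma invA {m : Int} (hm : m ≠ 0) (N : ℕ) :
    ∀ σ : ℕ, σ ≤ N →
      (stN m N σ).1.length = N+1 ∧ (stN m N σ).2.1.length = N+1 ∧ (stN m N σ).2.2.length = N+1 ∧
      (∀ i : ℕ, 1 ≤ i → i ≤ σ →
        (stN m N σ).1.getD i 0 = PySem.Int.mod (P i) m ∧
        (stN m N σ).2.1.getD i 0 = PySem.Int.mod (SF i) m ∧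
        (stN m N σ).2.2.getD i 0 = PySem.Int.mod (SF2 i) m) ∧
      (∀ i : ℕ, i ≤ N → (i = 0 ∨ σ < i) →
        (stN m N σ).1.getD i 0 = 0 ∧ (stN m N σ).2.1.getD i 0 = 0 ∧ (stN m N σ).2.2.getD i 0 = 0) := by
  intro σ
  induction σ with
  | zero =>
    intro _
    have h0 : stN m N 0 = (List.replicate (N+1) 0, List.replicate (N+1) 0, List.replicate (N+1) 0) := by
      unfold stN
      rw [show ((0:ℕ):Int)+1 = (1:Int) from by norm_num, PySem.List.pyRange_one_eq_nil (by norm_num)]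
      rfl
    rw [h0]
    refine ⟨by simp, by simp, by simp, fun i h1 h2 => by omega, fun i _ _ => ?_⟩
    exact ⟨getD_repl _ _, getD_repl _ _, getD_repl _ _⟩
  | succ σ ih =>
    intro hσN
    obtain ⟨hl1, hl2, hl3, hset, hzero⟩ := ih (by omega)
    have hpc : ∀ τ : ℕ, τ ≤ σ → Int.ModEq m ((stN m N σ).1.getD τ 0) (P τ) := by
      intro τ hτ
      rcases Nat.eq_zero_or_pos τ with h | h
      · subst h
        rw [(hzero 0 (by omega) (Or.inl rfl)).1, show P 0 = 0 from by simp [P]]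
      · rw [(hset τ h hτ).1]
        exact pm_modeq _ m
    have hfc : ∀ τ : ℕ, τ ≤ σ → Int.ModEq m ((stN m N σ).2.1.getD τ 0) (SF τ) := by
      intro τ hτ
      rcases Nat.eq_zero_or_pos τ with h | h
      · subst h
        rw [(hzero 0 (by omega) (Or.inl rfl)).2.1, show SF 0 = 0 from by simp [SF]]
      · rw [(hset τ h hτ).2.1]
        exact pm_modeq _ m
    have hf2c : ∀ τ : ℕ, τ ≤ σ → Int.ModEq m ((stN m N σ).2.2.getD τ 0) (SF2 τ) := by
      intro τ hτ
      rcases Nat.eq_zero_or_pos τ with h | h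
      · subst h
        rw [(hzero 0 (by omega) (Or.inl rfl)).2.2, show SF2 0 = 0 from by simp [SF2]]
      · rw [(hset τ h hτ).2.2]
        exact pm_modeq _ m
    rw [stN_succ]
    unfold loopA
    dsimp only
    rw [show ((σ:Int)+1) = (((σ+1:ℕ)):Int) from by push_cast; ring]
    rw [PySem.List.pySetD_natCast, PySem.List.pySetD_natCast, PySem.List.pySetD_natCast]
    rw [show (((σ+1:ℕ)):Int) = ((σ:Int)+1) from by push_cast; ring]
    have hv1 : computePrimitive ((σ:Int)+1) (factL m N) (stN m N σ).1 m
        = PySem.Int.mod (P (σ+1)) m := prim_step hm N σ (by omega) _ hpc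
    rw [hv1]
    set p' := (stN m N σ).1.set (σ+1) (PySem.Int.mod (P (σ+1)) m) with hp'def
    have hp' : ∀ τ : ℕ, τ ≤ σ + 1 → Int.ModEq m (p'.getD τ 0) (P τ) := by
      intro τ hτ
      rcases Nat.lt_or_ge τ (σ+1) with h | h
      · rw [hp'def, getD_set_ne _ _ _ _ (by omega)]
        exact hpc τ (by omega)
      · have : τ = σ + 1 := by omega
        subst this
        rw [hp'def, getD_set_self _ _ _ (by omega)]
        exact pm_modeq _ m
    have hv2 : computeSumF ((σ:Int)+1) (factL m N) p' (stN m N σ).2.1 m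
        = PySem.Int.mod (SF (σ+1)) m := sumF_step hm N σ (by omega) _ _ hp' hfc
    rw [hv2]
    set f' := (stN m N σ).2.1.set (σ+1) (PySem.Int.mod (SF (σ+1)) m) with hf'def
    have hf' : ∀ τ : ℕ, τ ≤ σ → Int.ModEq m (f'.getD τ 0) (SF τ) := by
      intro τ hτ
      rw [hf'def, getD_set_ne _ _ _ _ (by omega)]
      exact hfc τ hτ
    have hv3 : computeSumF2 ((σ:Int)+1) (factL m N) p' f' (stN m N σ).2.2 m
        = PySem.Int.mod (SF2 (σ+1)) m := sumF2_step hm N σ (by omega) _ _ _ hp' hf' hf2c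
    rw [hv3]
    refine ⟨by simp [hp'def, hl1], by simp [hf'def, hl2], by simp [hl3], ?_, ?_⟩
    · intro i h1 h2
      rcases Nat.lt_or_ge i (σ+1) with h | h
      · exact ⟨by rw [hp'def, getD_set_ne _ _ _ _ (by omega)]; exact (hset i h1 (by omega)).1,
          by rw [hf'def, getD_set_ne _ _ _ _ (by omega)]; exact (hset i h1 (by omega)).2.1,
          by rw [getD_set_ne _ _ _ _ (by omega)]; exact (hset i h1 (by omega)).2.2⟩
      · have : i = σ + 1 := by omega
        subst this
        exact ⟨by rw [hp'def, getD_set_self _ _ _ (by rw [hl1]; omega)],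
          by rw [hf'def, getD_set_self _ _ _ (by rw [hl2]; omega)],
          by rw [getD_set_self _ _ _ (by rw [hl3]; omega)]⟩
    · intro i hiN hi
      have hne : i ≠ σ + 1 := by omega
      refine ⟨?_, ?_, ?_⟩
      · rw [hp'def, getD_set_ne _ _ _ _ hne]
        exact (hzero i hiN (by omega)).1
      · rw [hf'def, getD_set_ne _ _ _ _ hne]
        exact (hzero i hiN (by omega)).2.1
      · rw [getD_set_ne _ _ _ _ hne]
        exact (hzero i hiN (by omega)).2.2

lemma computeFact_eq (m : Int) (N : ℕ) :
    computeFact (List.replicate (N+1) 1) ((N:ℕ):Int) m = factL m N := by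
  unfold computeFact
  rw [fact_char_aux m N N (le_refl N), Nat.sub_self]
  simp [factL]

lemma prim0_eq (N : ℕ) :
    PySem.List.pySetD (List.replicate (N+1) (0:Int)) 0 0 = List.replicate (N+1) 0 := by
  simp [pysem]

lemma A_val {m : Int} (hm : m ≠ 0) (hm1 : m ≠ 1) (N : ℕ) :
    solve ((N:ℕ):Int) m = PySem.Int.mod (SF2 N) m := by
  have hs : solve ((N:ℕ):Int) m = PySem.List.pyGetD
      ((PySem.List.pyRange 1 (((N:ℕ):Int)+1) 1).foldl
        (loopA (computeFact (List.replicate (((N:ℕ):Int)+1).toNat 1) ((N:ℕ):Int) m) m)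
        (PySem.List.pySetD (List.replicate (((N:ℕ):Int)+1).toNat 0) 0 0,
         List.replicate (((N:ℕ):Int)+1).toNat 0,
         List.replicate (((N:ℕ):Int)+1).toNat 0)).2.2 ((N:ℕ):Int) 0 := by
    unfold solve
    rw [if_neg hm1]
  rw [hs, show (((N:ℕ):Int)+1).toNat = N+1 from by omega, computeFact_eq, prim0_eq,
    PySem.List.pyGetD_natCast]
  have hstn : (PySem.List.pyRange 1 (((N:ℕ):Int)+1) 1).foldl (loopA (factL m N) m)
      (List.replicate (N+1) 0, List.replicate (N+1) 0, List.replicate (N+1) 0) = stN m N N := rfl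
  rw [hstn]
  rcases Nat.eq_zero_or_pos N with h | h
  · subst h
    rw [((invA hm 0 0 (le_refl 0)).2.2.2.2 0 (le_refl 0) (Or.inl rfl)).2.2]
    rw [show SF2 0 = 0 from by simp [SF2], pm_zero hm]
  · exact (((invA hm N N (le_refl N)).2.2.2.1) N h (le_refl N)).2.2

lemma inner_modeq (m : Int) (N κ : ℕ) (hκ1 : 1 ≤ κ) (hκN : κ ≤ N) :
    Int.ModEq m
      ((PySem.List.pyRange 1 ((κ:ℕ):Int) 1).foldl
        (fun s j => s + 2 * PySem.List.pyGetD (factL m N) j 0 * PySem.List.pyGetD (factL m N) (((κ:ℕ):Int) - j) 0)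
        (PySem.List.pyGetD (factL m N) ((κ:ℕ):Int) 0))
      (2 * SF κ - F κ) := by
  have hcong := foldl_modeq_plain m
    (fun s j => s + 2 * PySem.List.pyGetD (factL m N) j 0 * PySem.List.pyGetD (factL m N) (((κ:ℕ):Int) - j) 0)
    (fun b j => b + 2 * F j.toNat * F (κ - j.toNat))
    (PySem.List.pyRange 1 ((κ:ℕ):Int) 1)
    (PySem.List.pyGetD (factL m N) ((κ:ℕ):Int) 0) (F κ)
    (by
      intro j hj a b hab
      rw [PySem.List.mem_pyRange_one] at hj
      dsimp only
      obtain ⟨ι, rfl⟩ : ∃ ι : ℕ, j = (ι : Int) := ⟨j.toNat, by omega⟩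
      simp only [Int.toNat_natCast]
      have hι1 : 1 ≤ ι := by omega
      have hικ : ι ≤ κ - 1 := by omega
      have hidx : ((κ:ℕ):Int) - (ι:Int) = (((κ-ι : ℕ)) : Int) := by push_cast; omega
      rw [hidx, getF m N ι (by omega), getF m N (κ-ι) (by omega)]
      exact hab.add (((Fm_modeq m ι).mul_left 2).mul (Fm_modeq m (κ-ι))))
    (by rw [getF m N κ hκN]; exact Fm_modeq m κ)
  have hpure : (PySem.List.pyRange 1 ((κ:ℕ):Int) 1).foldl
      (fun b j => b + 2 * F j.toNat * F (κ - j.toNat)) (F κ) = 2 * SF κ - F κ := by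
    rw [show ((κ:ℕ):Int) = (((κ-1:ℕ)):Int)+1 from by push_cast [hκ1]; omega]
    rw [PySem.List.foldl_add, sum_map_pyRange (κ-1)]
    have hterm : ∀ t ∈ Finset.range (κ-1),
        2 * F (((t:Int)+1).toNat) * F (κ - ((t:Int)+1).toNat)
          = 2 * (F (t+1) * F ((κ-1) - t)) := by
      intro t ht
      have h1 : ((t:Int)+1).toNat = t+1 := by omega
      rw [h1, show κ - (t+1) = (κ-1) - t from by omega]
      ring
    have hsf := SF_split (κ-1)
    rw [show (κ-1)+1 = κ from by omega] at hsf
    rw [Finset.sum_congr rfl hterm, ← Finset.mul_sum,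
      show (∑ k ∈ Finset.range (κ-1), F (k+1) * F ((κ-1) - k)) = SF κ - F κ from by linarith]
    ring
  rw [hpure] at hcong
  exact hcong

lemma B_val {m : Int} (hm : m ≠ 0) (hm1 : m ≠ 1) (N : ℕ) :
    solve_alt ((N:ℕ):Int) m = PySem.Int.mod (SF2 N) m := by
  have hs : solve_alt ((N:ℕ):Int) m =
      (PySem.List.pyRange 1 (((N:ℕ):Int)+1) 1).foldl (loopB (factL m N) ((N:ℕ):Int) m) 0 := by
    unfold solve_alt
    rw [if_neg hm1]
    rw [show ((((N:ℕ):Int))+1).toNat = N+1 from by omega]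
    rw [show (PySem.List.pyRange 1 (((N:ℕ):Int)+1) 1).foldl
        (fun f i => PySem.List.pySetD f i (PySem.Int.mod (PySem.List.pyGetD f (i-1) 0 * i) m))
        (List.replicate (N+1) 1) = factL m N from by
      rw [fact_char_aux m N N (le_refl N), Nat.sub_self]; simp [factL]]
  have hlam : loopB (factL m N) ((N:ℕ):Int) m = (fun total k =>
      PySem.Int.mod (total +
        ((PySem.List.pyRange 1 k 1).foldl
          (fun s j => s + 2 * PySem.List.pyGetD (factL m N) j 0 * PySem.List.pyGetD (factL m N) (k - j) 0)
          (PySem.List.pyGetD (factL m N) k 0)) * PySem.List.pyGetD (factL m N) (((N:ℕ):Int) - k) 0) m) := rfl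
  rw [hs, hlam]
  rcases Nat.eq_zero_or_pos N with h | h
  · subst h
    rw [show (((0:ℕ):Int)+1) = (1:Int) from by norm_num, PySem.List.pyRange_one_eq_nil (by norm_num)]
    rw [show SF2 0 = 0 from by simp [SF2], pm_zero hm]
    rfl
  · have hcong := foldl_pm_modeq m
      (fun total k => total +
          ((PySem.List.pyRange 1 k 1).foldl
            (fun s j => s + 2 * PySem.List.pyGetD (factL m N) j 0 * PySem.List.pyGetD (factL m N) (k - j) 0)
            (PySem.List.pyGetD (factL m N) k 0)) * PySem.List.pyGetD (factL m N) (((N:ℕ):Int) - k) 0)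
      (fun b k => b + (2 * SF k.toNat - F k.toNat) * F (N - k.toNat))
      (PySem.List.pyRange 1 (((N:ℕ):Int)+1) 1) 0 0
      (by
        intro k hk a b hab
        rw [PySem.List.mem_pyRange_one] at hk
        dsimp only
        obtain ⟨κ, rfl⟩ : ∃ κ : ℕ, k = (κ : Int) := ⟨k.toNat, by omega⟩
        simp only [Int.toNat_natCast]
        have hκ1 : 1 ≤ κ := by omega
        have hκN : κ ≤ N := by omega
        have hidx : ((N:ℕ):Int) - (κ:Int) = (((N-κ : ℕ)) : Int) := by push_cast; omega
        rw [hidx, getF m N (N-κ) (by omega)]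
        exact hab.add ((inner_modeq m N κ hκ1 hκN).mul (Fm_modeq m (N-κ))))
      (Int.ModEq.refl 0)
    have hpure : (PySem.List.pyRange 1 (((N:ℕ):Int)+1) 1).foldl
        (fun b k => b + (2 * SF k.toNat - F k.toNat) * F (N - k.toNat)) 0 = SF2 N := by
      rw [PySem.List.foldl_add, sum_map_pyRange N, zero_add, L3 N]
      refine Finset.sum_congr rfl fun t ht => ?_
      have h1 : ((t:Int)+1).toNat = t+1 := by omega
      rw [h1]
    have hred := foldl_pm_red m hm
      (fun total k => total +
          ((PySem.List.pyRange 1 k 1).foldl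
            (fun s j => s + 2 * PySem.List.pyGetD (factL m N) j 0 * PySem.List.pyGetD (factL m N) (k - j) 0)
            (PySem.List.pyGetD (factL m N) k 0)) * PySem.List.pyGetD (factL m N) (((N:ℕ):Int) - k) 0)
      (PySem.List.pyRange 1 (((N:ℕ):Int)+1) 1) 0
      (Or.inl (nonempty_pyRange N (by omega)))
    rw [hpure] at hcong
    rw [← hred]
    exact pm_congr hm hcong

-- ===== VERDICT (by name: the statement is the Claim_ definition above) =====
theorem solve_spec : Claim_equal_solve := by
  unfold Claim_equal_solve
  intro n mod hdom hpre
  unfold Spec_solve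
  obtain ⟨hm0, hcase⟩ := hpre
  by_cases hm1 : mod = 1
  · subst hm1
    rw [show solve n 1 = 0 from by unfold solve; rw [if_pos rfl],
      show solve_alt n 1 = 0 from by unfold solve_alt; rw [if_pos rfl]]
  · rcases hcase with hn | hc
    · obtain ⟨N, rfl⟩ : ∃ N : ℕ, n = (N : Int) := ⟨n.toNat, by omega⟩
      rw [A_val hm0 hm1 N, B_val hm0 hm1 N]
    · exact absurd hc hm1
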